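-- pv_equiv track=rewrite | github.com/tennyson-mccalla/SuperNavigator | navigator-main/skills/product-design/functions/component_mapper.py | extract_variant_mapping
-- ===== SOURCE A (Python) =====
-- from typing import Dict, List, Any
--
-- def extract_variant_mapping(figma_name: str) -> Dict[str, str]:
--     """
--     Extract variant information from Figma component name.
--
--     Examples:
--         "Button/Primary/Large" → {"variant": "primary", "size": "lg"}
--         "Card/Elevated" → {"variant": "elevated"}
--
--     Args:
--         figma_name: Figma component name with variants
--
--     Returns:
--         Dictionary of variant properties
--     """
--     parts = [p.strip() for p in figma_name.split('/')]
--
--     if len(parts) == 1: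
--         return {}
--
--     # Base component is first part
--     variants = parts[1:]
--
--     # Map common variant patterns
--     mapping = {}
--
--     for variant in variants:
--         variant_lower = variant.lower()
--
--         # Size variants
--         if variant_lower in ['small', 'sm', 'xs', 'tiny']:
--             mapping['size'] = 'sm'
--         elif variant_lower in ['medium', 'md', 'base']:
--             mapping['size'] = 'md'
--         elif variant_lower in ['large', 'lg']:
--             mapping['size'] = 'lg'
--         elif variant_lower in ['xl', 'xlarge', 'extra-large']:
--             mapping['size'] = 'xl'
--
--         # Style variants
--         elif variant_lower in ['primary', 'main']:
--             mapping['variant'] = 'primary'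
--         elif variant_lower in ['secondary', 'outline', 'outlined']:
--             mapping['variant'] = 'secondary'
--         elif variant_lower in ['tertiary', 'ghost', 'link', 'text']:
--             mapping['variant'] = 'ghost'
--
--         # State variants
--         elif variant_lower in ['disabled', 'inactive']:
--             mapping['state'] = 'disabled'
--         elif variant_lower in ['loading', 'busy']:
--             mapping['state'] = 'loading'
--
--         # Type variants
--         elif variant_lower in ['solid', 'filled']:
--             mapping['type'] = 'solid'
--         elif variant_lower in ['elevated', 'raised']:
--             mapping['type'] = 'elevated'
--         elif variant_lower in ['flat', 'plain']:
--             mapping['type'] = 'flat'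
--
--         # If no pattern matches, use as generic variant
--         else:
--             if 'variant' not in mapping:
--                 mapping['variant'] = variant_lower
--
--     return mapping
-- ===== SOURCE B (Python) =====
-- _TABLE = {
--     'small': ('size', 'sm'), 'sm': ('size', 'sm'), 'xs': ('size', 'sm'), 'tiny': ('size', 'sm'),
--     'medium': ('size', 'md'), 'md': ('size', 'md'), 'base': ('size', 'md'),
--     'large': ('size', 'lg'), 'lg': ('size', 'lg'),
--     'xl': ('size', 'xl'), 'xlarge': ('size', 'xl'), 'extra-large': ('size', 'xl'),
--     'primary': ('variant', 'primary'), 'main': ('variant', 'primary'),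
--     'secondary': ('variant', 'secondary'), 'outline': ('variant', 'secondary'), 'outlined': ('variant', 'secondary'),
--     'tertiary': ('variant', 'ghost'), 'ghost': ('variant', 'ghost'), 'link': ('variant', 'ghost'), 'text': ('variant', 'ghost'),
--     'disabled': ('state', 'disabled'), 'inactive': ('state', 'disabled'),
--     'loading': ('state', 'loading'), 'busy': ('state', 'loading'),
--     'solid': ('type', 'solid'), 'filled': ('type', 'solid'),
--     'elevated': ('type', 'elevated'), 'raised': ('type', 'elevated'),
--     'flat': ('type', 'flat'), 'plain': ('type', 'flat'),
-- }
--
--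
-- def _assigns(tokens, have_variant):
--     """Recursively turn lowered tokens into an assignment list; a token outside the
--     table contributes a ('variant', token) assignment only while no 'variant'
--     assignment has been produced yet."""
--     if not tokens:
--         return []
--     head, rest = tokens[0], tokens[1:]
--     hit = _TABLE.get(head)
--     if hit is not None:
--         return [hit] + _assigns(rest, have_variant or hit[0] == 'variant')
--     if have_variant:
--         return _assigns(rest, True)
--     return [('variant', head)] + _assigns(rest, True)
--
--
-- def extract_variant_mapping(figma_name: str):
--     parts = [p.strip() for p in figma_name.split('/')]
--     if len(parts) == 1:
--         return {}
--     return dict(_assigns([p.lower() for p in parts[1:]], False))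
-- ===== Notes on version B (the rewrite author's own statement) =====
-- stated objective: alternative
-- what changed: A mutates a dict inside one loop with a 13-branch if/elif chain and a membership guard; B is a staged pipeline: a recursive classifier turns the lowered name parts into an explicit assignment list (carrying only a boolean 'variant already assigned' flag), which the dict() constructor then collapses.
import Mathlib
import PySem

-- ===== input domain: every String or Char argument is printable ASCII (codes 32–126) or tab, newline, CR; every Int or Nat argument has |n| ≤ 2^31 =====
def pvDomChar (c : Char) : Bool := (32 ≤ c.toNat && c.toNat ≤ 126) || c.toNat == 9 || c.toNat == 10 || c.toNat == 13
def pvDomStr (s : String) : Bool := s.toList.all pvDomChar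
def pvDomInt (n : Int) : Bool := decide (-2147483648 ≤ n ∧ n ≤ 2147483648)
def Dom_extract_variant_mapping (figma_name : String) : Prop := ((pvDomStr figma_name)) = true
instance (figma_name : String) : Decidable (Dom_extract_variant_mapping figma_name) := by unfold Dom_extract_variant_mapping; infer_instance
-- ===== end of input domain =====

-- B replaces A's mutable-dict loop with guarded membership by a staged pipeline: a recursive
-- classification producing an assignment list, folded into a dict at the end (alternative decomposition).

-- ===== PORT A =====
-- body of A's for-loop over variants
def evmStepA (mapping : PySem.Dict String String) (variant : String) : PySem.Dict String String :=
  let variant_lower := PySem.Str.lower variant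
  if ["small", "sm", "xs", "tiny"].contains variant_lower then mapping.insert "size" "sm"
  else if ["medium", "md", "base"].contains variant_lower then mapping.insert "size" "md"
  else if ["large", "lg"].contains variant_lower then mapping.insert "size" "lg"
  else if ["xl", "xlarge", "extra-large"].contains variant_lower then mapping.insert "size" "xl"
  else if ["primary", "main"].contains variant_lower then mapping.insert "variant" "primary"
  else if ["secondary", "outline", "outlined"].contains variant_lower then mapping.insert "variant" "secondary"
  else if ["tertiary", "ghost", "link", "text"].contains variant_lower then mapping.insert "variant" "ghost"
  else if ["disabled", "inactive"].contains variant_lower then mapping.insert "state" "disabled"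
  else if ["loading", "busy"].contains variant_lower then mapping.insert "state" "loading"
  else if ["solid", "filled"].contains variant_lower then mapping.insert "type" "solid"
  else if ["elevated", "raised"].contains variant_lower then mapping.insert "type" "elevated"
  else if ["flat", "plain"].contains variant_lower then mapping.insert "type" "flat"
  else if mapping.contains "variant" then mapping else mapping.insert "variant" variant_lower

def extract_variant_mapping (figma_name : String) : List (String × String) :=
  let parts := ((PySem.Str.split? figma_name "/").getD []).map (fun p => PySem.Str.strip p)
  if parts.length = 1 then []
  else
    let variants := PySem.List.slice parts (some 1) none
    (variants.foldl evmStepA PySem.Dict.empty).items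

-- ===== PORT B =====
-- _TABLE of Source B
def evmTable : PySem.Dict String (String × String) := PySem.Dict.ofList
  [("small", ("size", "sm")), ("sm", ("size", "sm")), ("xs", ("size", "sm")), ("tiny", ("size", "sm")),
   ("medium", ("size", "md")), ("md", ("size", "md")), ("base", ("size", "md")),
   ("large", ("size", "lg")), ("lg", ("size", "lg")),
   ("xl", ("size", "xl")), ("xlarge", ("size", "xl")), ("extra-large", ("size", "xl")),
   ("primary", ("variant", "primary")), ("main", ("variant", "primary")),
   ("secondary", ("variant", "secondary")), ("outline", ("variant", "secondary")), ("outlined", ("variant", "secondary")),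
   ("tertiary", ("variant", "ghost")), ("ghost", ("variant", "ghost")), ("link", ("variant", "ghost")), ("text", ("variant", "ghost")),
   ("disabled", ("state", "disabled")), ("inactive", ("state", "disabled")),
   ("loading", ("state", "loading")), ("busy", ("state", "loading")),
   ("solid", ("type", "solid")), ("filled", ("type", "solid")),
   ("elevated", ("type", "elevated")), ("raised", ("type", "elevated")),
   ("flat", ("type", "flat")), ("plain", ("type", "flat"))]

-- _assigns of Source B: recursive classification of the lowered tokens into an assignment list
def evmAssigns : List String → Bool → List (String × String)
  | [], _ => []
  | head :: rest, have_variant =>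
    match evmTable.get? head with
    | some hit => hit :: evmAssigns rest (have_variant || hit.1 == "variant")
    | none =>
      if have_variant then evmAssigns rest true
      else ("variant", head) :: evmAssigns rest true

def extract_variant_mapping_alt (figma_name : String) : List (String × String) :=
  let parts := ((PySem.Str.split? figma_name "/").getD []).map (fun p => PySem.Str.strip p)
  if parts.length = 1 then []
  else
    -- dict(_assigns([p.lower() for p in parts[1:]], False))
    (PySem.Dict.ofList
      (evmAssigns ((PySem.List.slice parts (some 1) none).map PySem.Str.lower) false)).items

-- ===== PRECONDITION & SPEC =====
def Spec_extract_variant_mapping (figma_name : String) (out : List (String × String)) : Prop := out = extract_variant_mapping_alt figma_name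
instance (figma_name : String) (out : List (String × String)) : Decidable (Spec_extract_variant_mapping figma_name out) := by unfold Spec_extract_variant_mapping; infer_instance

-- ===== CLAIM (what is proved, stated in full; the proofs are below) =====
def Claim_equal_extract_variant_mapping : Prop := ∀ (figma_name : String), Dom_extract_variant_mapping figma_name → Spec_extract_variant_mapping figma_name (extract_variant_mapping figma_name)

-- ===== LEMMAS AND PROOFS =====
lemma evmTable_mk : evmTable = PySem.Dict.mk
  [("small", ("size", "sm")), ("sm", ("size", "sm")), ("xs", ("size", "sm")), ("tiny", ("size", "sm")),
   ("medium", ("size", "md")), ("md", ("size", "md")), ("base", ("size", "md")),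
   ("large", ("size", "lg")), ("lg", ("size", "lg")),
   ("xl", ("size", "xl")), ("xlarge", ("size", "xl")), ("extra-large", ("size", "xl")),
   ("primary", ("variant", "primary")), ("main", ("variant", "primary")),
   ("secondary", ("variant", "secondary")), ("outline", ("variant", "secondary")), ("outlined", ("variant", "secondary")),
   ("tertiary", ("variant", "ghost")), ("ghost", ("variant", "ghost")), ("link", ("variant", "ghost")), ("text", ("variant", "ghost")),
   ("disabled", ("state", "disabled")), ("inactive", ("state", "disabled")),
   ("loading", ("state", "loading")), ("busy", ("state", "loading")),
   ("solid", ("type", "solid")), ("filled", ("type", "solid")),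
   ("elevated", ("type", "elevated")), ("raised", ("type", "elevated")),
   ("flat", ("type", "flat")), ("plain", ("type", "flat"))] := by decide

set_option maxRecDepth 8192 in
-- A's branch chain, expressed through B's table: one step of A is one table consultation
lemma evmStepA_eq_table (mapping : PySem.Dict String String) (variant : String) :
    evmStepA mapping variant =
      match evmTable.get? (PySem.Str.lower variant) with
      | some hit => mapping.insert hit.1 hit.2
      | none =>
        if mapping.contains "variant" then mapping
        else mapping.insert "variant" (PySem.Str.lower variant) := by
  unfold evmStepA
  rw [evmTable_mk]
  generalize PySem.Str.lower variant = s
  by_cases h0 : s = "small"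
  · subst h0; rfl
  by_cases h1 : s = "sm"
  · subst h1; rfl
  by_cases h2 : s = "xs"
  · subst h2; rfl
  by_cases h3 : s = "tiny"
  · subst h3; rfl
  by_cases h4 : s = "medium"
  · subst h4; rfl
  by_cases h5 : s = "md"
  · subst h5; rfl
  by_cases h6 : s = "base"
  · subst h6; rfl
  by_cases h7 : s = "large"
  · subst h7; rfl
  by_cases h8 : s = "lg"
  · subst h8; rfl
  by_cases h9 : s = "xl"
  · subst h9; rfl
  by_cases h10 : s = "xlarge"
  · subst h10; rfl
  by_cases h11 : s = "extra-large"
  · subst h11; rfl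
  by_cases h12 : s = "primary"
  · subst h12; rfl
  by_cases h13 : s = "main"
  · subst h13; rfl
  by_cases h14 : s = "secondary"
  · subst h14; rfl
  by_cases h15 : s = "outline"
  · subst h15; rfl
  by_cases h16 : s = "outlined"
  · subst h16; rfl
  by_cases h17 : s = "tertiary"
  · subst h17; rfl
  by_cases h18 : s = "ghost"
  · subst h18; rfl
  by_cases h19 : s = "link"
  · subst h19; rfl
  by_cases h20 : s = "text"
  · subst h20; rfl
  by_cases h21 : s = "disabled"
  · subst h21; rfl
  by_cases h22 : s = "inactive"
  · subst h22; rfl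
  by_cases h23 : s = "loading"
  · subst h23; rfl
  by_cases h24 : s = "busy"
  · subst h24; rfl
  by_cases h25 : s = "solid"
  · subst h25; rfl
  by_cases h26 : s = "filled"
  · subst h26; rfl
  by_cases h27 : s = "elevated"
  · subst h27; rfl
  by_cases h28 : s = "raised"
  · subst h28; rfl
  by_cases h29 : s = "flat"
  · subst h29; rfl
  by_cases h30 : s = "plain"
  · subst h30; rfl
  simp only [PySem.Dict.get?_mk_cons, List.contains_cons, List.contains_nil, beq_iff_eq,
    Bool.or_false, Bool.or_eq_true]
  simp only [h0, Ne.symm h0, h1, Ne.symm h1, h2, Ne.symm h2, h3, Ne.symm h3, h4, Ne.symm h4, h5, Ne.symm h5, h6, Ne.symm h6, h7, Ne.symm h7, h8, Ne.symm h8, h9, Ne.symm h9, h10, Ne.symm h10, h11, Ne.symm h11, h12, Ne.symm h12, h13, Ne.symm h13, h14, Ne.symm h14, h15, Ne.symm h15, h16, Ne.symm h16, h17, Ne.symm h17, h18, Ne.symm h18, h19, Ne.symm h19, h20, Ne.symm h20, h21, Ne.symm h21, h22, Ne.symm h22, h23, Ne.symm h23, h24, Ne.symm h24, h25, Ne.symm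 h25, h26, Ne.symm h26, h27, Ne.symm h27, h28, Ne.symm h28, h29, Ne.symm h29, h30, Ne.symm h30, or_self, if_false]
  rfl

-- loop invariant: A's fold from any dict d equals folding the assignment list B builds,
-- where the Boolean parameter tracks whether d already has a 'variant' key
lemma evm_fold_eq (ls : List String) (d : PySem.Dict String String) :
    ls.foldl evmStepA d =
      (evmAssigns (ls.map PySem.Str.lower) (d.contains "variant")).foldl
        (fun m p => m.insert p.1 p.2) d := by
  induction ls generalizing d with
  | nil => rfl
  | cons l ls ih =>
    simp only [List.foldl_cons, List.map_cons, evmAssigns]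
    rw [evmStepA_eq_table]
    cases hget : evmTable.get? (PySem.Str.lower l) with
    | some hit =>
      simp only [List.foldl_cons, ih (d.insert hit.1 hit.2), PySem.Dict.contains_insert]
      have : ("variant" == hit.1 || d.contains "variant")
           = (d.contains "variant" || hit.1 == "variant") := by
        rw [Bool.or_comm, BEq.comm]
      rw [this]
    | none =>
      by_cases hc : d.contains "variant" = true
      · simp only [if_true, ih d, hc]
      · simp only [Bool.not_eq_true] at hc
        simp only [hc, Bool.false_eq_true, if_false, List.foldl_cons,
          ih (d.insert "variant" (PySem.Str.lower l)), PySem.Dict.contains_insert_self]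

-- ===== VERDICT (by name: the statement is the Claim_ definition above) =====
theorem extract_variant_mapping_spec : Claim_equal_extract_variant_mapping := by
  intro figma_name _
  unfold Spec_extract_variant_mapping extract_variant_mapping extract_variant_mapping_alt
  simp only []
  rw [evm_fold_eq]
  rfl
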